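-- pv_equiv track=rewrite | github.com/kbalaji4/Auto_Snake | hamiltonian_cycle.py | generate_hamiltonian_cycle
-- ===== SOURCE A (Python) =====
-- from typing import List, Tuple, Optional, Set, Dict
--
-- def generate_hamiltonian_cycle(grid_size: int) -> List[Tuple[int, int]]:
--     """
--     Generate a Hamiltonian cycle for the grid using a spiral pattern.
--     This creates a cycle that visits every cell exactly once.
--
--     Args:
--         grid_size: Size of the grid
--
--     Returns:
--         List of positions forming a Hamiltonian cycle
--     """
--     cycle = []
--     visited = [[False] * grid_size for _ in range(grid_size)]
--
--     # Use a proper spiral pattern starting from top-left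
--     # Directions: right, down, left, up
--     directions = [(0, 1), (1, 0), (0, -1), (-1, 0)]
--     dir_idx = 0
--
--     x, y = 0, 0
--
--     for _ in range(grid_size * grid_size):
--         cycle.append((x, y))
--         visited[x][y] = True
--
--         # Calculate next position
--         dx, dy = directions[dir_idx]
--         next_x = x + dx
--         next_y = y + dy
--
--         # Check if we need to change direction
--         # Change direction if:
--         # 1. Next position is out of bounds, OR
--         # 2. Next position is already visited
--         if (next_x < 0 or next_x >= grid_size or
--             next_y < 0 or next_y >= grid_size or
--             visited[next_x][next_y]):
--             # Change direction
--             dir_idx = (dir_idx + 1) % 4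
--             dx, dy = directions[dir_idx]
--             next_x = x + dx
--             next_y = y + dy
--
--         x, y = next_x, next_y
--
--     return cycle
-- ===== SOURCE B (Python) =====
-- def generate_hamiltonian_cycle(grid_size):
--     """Boundary-shrinking spiral: emit the four sides of each ring, shrinking
--     the bounds, instead of simulating a walker with a visited matrix."""
--     cycle = []
--     top, bottom, left, right = 0, grid_size - 1, 0, grid_size - 1
--     while top <= bottom and left <= right:
--         for y in range(left, right + 1):
--             cycle.append((top, y))
--         for x in range(top + 1, bottom + 1):
--             cycle.append((x, right))
--         if top < bottom:
--             for y in range(right - 1, left - 1, -1):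
--                 cycle.append((bottom, y))
--         if left < right:
--             for x in range(bottom - 1, top, -1):
--                 cycle.append((x, left))
--         top += 1
--         bottom -= 1
--         left += 1
--         right -= 1
--     return cycle
-- ===== Notes on version B (the rewrite author's own statement) =====
-- stated objective: simpler
-- what changed: Replaced A's step-by-step spiral walker (visited matrix, direction vector, per-cell turn test) by a boundary-shrinking spiral that emits the four sides of each ring while shrinking top/bottom/left/right bounds, with no visited matrix and no per-step test; Pre_ excludes negative grid_size, on which A raises IndexError.
import Mathlib
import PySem

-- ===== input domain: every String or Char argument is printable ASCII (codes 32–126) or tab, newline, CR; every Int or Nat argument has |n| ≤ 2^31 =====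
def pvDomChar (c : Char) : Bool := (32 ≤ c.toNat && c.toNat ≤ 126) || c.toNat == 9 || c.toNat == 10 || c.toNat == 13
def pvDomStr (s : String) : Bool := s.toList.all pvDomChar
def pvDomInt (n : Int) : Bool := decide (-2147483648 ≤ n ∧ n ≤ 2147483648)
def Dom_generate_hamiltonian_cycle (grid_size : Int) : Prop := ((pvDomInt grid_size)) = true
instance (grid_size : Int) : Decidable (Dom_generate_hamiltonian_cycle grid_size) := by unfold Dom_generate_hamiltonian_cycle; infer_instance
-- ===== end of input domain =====

-- B replaces A's visited-matrix spiral walker by a boundary-shrinking spiral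
-- (four shrinking bounds, one ring per pass): simpler — no visited matrix, no per-step turn test.

-- ===== PORT A =====
def pvDirs : List (Int × Int) := [(0, 1), (1, 0), (0, -1), (-1, 0)]
def pvDirAt (d : Int) : Int × Int := (PySem.List.pyGet? pvDirs d).getD (0, 0)
def pvVGet (v : List (List Bool)) (i j : Int) : Bool :=
  PySem.List.pyGetD (PySem.List.pyGetD v i []) j false
def pvVSet (v : List (List Bool)) (x y : Int) : List (List Bool) :=
  PySem.List.pySetD v x (PySem.List.pySetD (PySem.List.pyGetD v x []) y true)
-- the direction-change test of A, verbatim (abbrev so the `if` below finds decidability)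
abbrev pvTurnCond (n : Int) (v : List (List Bool)) (nx ny : Int) : Prop :=
  nx < 0 ∨ n ≤ nx ∨ ny < 0 ∨ n ≤ ny ∨ pvVGet v nx ny = true
def pvStepA (n : Int) :
    (List (Int × Int)) × (List (List Bool)) × Int × Int × Int →
    (List (Int × Int)) × (List (List Bool)) × Int × Int × Int
  | (c, v, d, x, y) =>
    let c2 := c ++ [(x, y)]
    let v2 := pvVSet v x y
    let dxy := pvDirAt d
    let nx := x + dxy.1
    let ny := y + dxy.2
    if pvTurnCond n v2 nx ny then
      let d2 := PySem.Int.mod (d + 1) 4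
      let dxy2 := pvDirAt d2
      (c2, v2, d2, x + dxy2.1, y + dxy2.2)
    else (c2, v2, d, nx, ny)


def generate_hamiltonian_cycle (grid_size : Int) : List (Int × Int) :=
  -- visited = [[False] * grid_size for _ in range(grid_size)]
  let visited := List.replicate grid_size.toNat (List.replicate grid_size.toNat false)
  -- for _ in range(grid_size * grid_size): one pvStepA per iteration
  ((pvStepA grid_size)^[(grid_size * grid_size).toNat] ([], visited, 0, 0, 0)).1

-- ===== PORT B =====
-- while top <= bottom and left <= right: emit the four sides of the current ring, shrink the bounds
def pvBLoop (c : List (Int × Int)) (t b l r : Int) : List (Int × Int) :=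
  if t ≤ b ∧ l ≤ r then
    let c1 := (PySem.List.pyRange l (r + 1) 1).foldl (fun acc y => acc ++ [(t, y)]) c
    let c2 := (PySem.List.pyRange (t + 1) (b + 1) 1).foldl (fun acc x => acc ++ [(x, r)]) c1
    let c3 := if t < b then (PySem.List.pyRange (r - 1) (l - 1) (-1)).foldl (fun acc y => acc ++ [(b, y)]) c2 else c2
    let c4 := if l < r then (PySem.List.pyRange (b - 1) t (-1)).foldl (fun acc x => acc ++ [(x, l)]) c3 else c3
    pvBLoop c4 (t + 1) (b - 1) (l + 1) (r - 1)
  else c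
termination_by (b + 1 - t).toNat
decreasing_by omega


def generate_hamiltonian_cycle_alt (grid_size : Int) : List (Int × Int) :=
  pvBLoop [] 0 (grid_size - 1) 0 (grid_size - 1)

-- ===== PRECONDITION & SPEC =====
-- A raises IndexError for every negative grid_size (visited is an empty list but the
-- loop still iterates grid_size*grid_size times); Pre_ keeps exactly the sizes on which A returns.
def Pre_generate_hamiltonian_cycle (grid_size : Int) : Prop := 0 ≤ grid_size
instance (grid_size : Int) : Decidable (Pre_generate_hamiltonian_cycle grid_size) := by
  unfold Pre_generate_hamiltonian_cycle; infer_instance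

def pvWitness_generate_hamiltonian_cycle : Int := 3

def Spec_generate_hamiltonian_cycle (grid_size : Int) (out : List (Int × Int)) : Prop :=
  out = generate_hamiltonian_cycle_alt grid_size
instance (grid_size : Int) (out : List (Int × Int)) :
    Decidable (Spec_generate_hamiltonian_cycle grid_size out) := by
  unfold Spec_generate_hamiltonian_cycle; infer_instance

-- ===== CLAIM (what is proved, stated in full; the proofs are below) =====
def Claim_equal_generate_hamiltonian_cycle : Prop :=
  ∀ (grid_size : Int), Dom_generate_hamiltonian_cycle grid_size →
    Pre_generate_hamiltonian_cycle grid_size →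
    Spec_generate_hamiltonian_cycle grid_size (generate_hamiltonian_cycle grid_size)

-- ===== LEMMAS AND PROOFS =====
theorem pvStepA_turn (n : Int) (c : List (Int × Int)) (v : List (List Bool)) (d x y : Int)
    {dx dy d2 dx2 dy2 : Int} (hd : pvDirAt d = (dx, dy)) (hm : (d + 1) % 4 = d2)
    (hd2 : pvDirAt d2 = (dx2, dy2))
    (h : pvTurnCond n (pvVSet v x y) (x + dx) (y + dy)) :
    pvStepA n (c, v, d, x, y) = (c ++ [(x, y)], pvVSet v x y, d2, x + dx2, y + dy2) := by
  simp [pvStepA, hd, h, hm, hd2]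

theorem pvStepA_move (n : Int) (c : List (Int × Int)) (v : List (List Bool)) (d x y : Int)
    {dx dy : Int} (hd : pvDirAt d = (dx, dy))
    (h : ¬ pvTurnCond n (pvVSet v x y) (x + dx) (y + dy)) :
    pvStepA n (c, v, d, x, y) = (c ++ [(x, y)], pvVSet v x y, d, x + dx, y + dy) := by
  simp [pvStepA, hd, h]

theorem pvStepA_fst (n : Int) (c : List (Int × Int)) (v : List (List Bool)) (d x y : Int) :
    (pvStepA n (c, v, d, x, y)).1 = c ++ [(x, y)] := by
  by_cases h : pvTurnCond n (pvVSet v x y) (x + (pvDirAt d).1) (y + (pvDirAt d).2)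
  · rw [pvStepA_turn n c v d x y rfl rfl rfl h]
  · rw [pvStepA_move n c v d x y rfl h]

theorem pvDirAt_0 : pvDirAt 0 = (0, 1) := by decide
theorem pvDirAt_1 : pvDirAt 1 = (1, 0) := by decide
theorem pvDirAt_2 : pvDirAt 2 = (0, -1) := by decide
theorem pvDirAt_3 : pvDirAt 3 = (-1, 0) := by decide
theorem pvMod1 : ((0:Int) + 1) % 4 = 1 := by decide
theorem pvMod2 : ((1:Int) + 1) % 4 = 2 := by decide
theorem pvMod3 : ((2:Int) + 1) % 4 = 3 := by decide
theorem pvMod0 : ((3:Int) + 1) % 4 = 0 := by decide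

def pvWFv (n : Int) (v : List (List Bool)) : Prop :=
  v.length = n.toNat ∧ ∀ row ∈ v, row.length = n.toNat

theorem pvVSet_eq (v : List (List Bool)) (x y : Int) (hx0 : 0 ≤ x) (hy0 : 0 ≤ y)
    (hxl : x < (v.length : Int)) :
    pvVSet v x y = v.set x.toNat ((v[x.toNat]'(by omega)).set y.toNat true) := by
  unfold pvVSet
  rw [PySem.List.pyGetD_eq_getElem v [] hx0 hxl, PySem.List.pySetD_of_nonneg _ _ hy0,
    PySem.List.pySetD_of_nonneg v _ hx0]

theorem pvWFv_vset (n : Int) (v : List (List Bool)) (x y : Int) (hwf : pvWFv n v)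
    (hx0 : 0 ≤ x) (hxn : x < n) (hy0 : 0 ≤ y) :
    pvWFv n (pvVSet v x y) := by
  obtain ⟨hl, hrows⟩ := hwf
  rw [pvVSet_eq v x y hx0 hy0 (by omega)]
  refine ⟨by simp [hl], fun row hrow => ?_⟩
  rcases List.mem_or_eq_of_mem_set hrow with h | h
  · exact hrows _ h
  · subst h; simp [hrows _ (List.getElem_mem _)]

theorem pvVGet_eq (n : Int) (v : List (List Bool)) (i j : Int)
    (hl : v.length = n.toNat) (hrows : ∀ row ∈ v, row.length = n.toNat)
    (hi0 : 0 ≤ i) (hin : i < n) (hj0 : 0 ≤ j) (hjn : j < n) :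
    pvVGet v i j = (v[i.toNat]'(by omega))[j.toNat]'(by
      rw [hrows _ (List.getElem_mem _)]; omega) := by
  unfold pvVGet
  rw [PySem.List.pyGetD_eq_getElem v [] hi0 (by omega)]
  rw [PySem.List.pyGetD_eq_getElem _ false hj0 (by rw [hrows _ (List.getElem_mem _)]; omega)]

theorem pvVGet_vset (n : Int) (v : List (List Bool)) (x y i j : Int) (hwf : pvWFv n v)
    (hx0 : 0 ≤ x) (hxn : x < n) (hy0 : 0 ≤ y) (hyn : y < n)
    (hi0 : 0 ≤ i) (hin : i < n) (hj0 : 0 ≤ j) (hjn : j < n) :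
    pvVGet (pvVSet v x y) i j = if i = x ∧ j = y then true else pvVGet v i j := by
  obtain ⟨hl', hrows'⟩ := pvWFv_vset n v x y hwf hx0 hxn hy0
  obtain ⟨hl, hrows⟩ := hwf
  rw [pvVGet_eq n _ i j hl' hrows' hi0 hin hj0 hjn, pvVGet_eq n v i j hl hrows hi0 hin hj0 hjn]
  simp only [pvVSet_eq v x y hx0 hy0 (by omega)] at *
  simp only [List.getElem_set]
  by_cases hix : x.toNat = i.toNat
  · simp only [hix, if_true, List.getElem_set]
    by_cases hjy : y.toNat = j.toNat
    · rw [if_pos hjy, if_pos ⟨by omega, by omega⟩]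
    · rw [if_neg hjy]
      have h2 : ¬(i = x ∧ j = y) := by omega
      rw [if_neg h2]
  · simp only [if_neg hix]
    have h2 : ¬(i = x ∧ j = y) := by omega
    simp [h2]

theorem pvVGet_replicate (n : Int) (i j : Int) :
    pvVGet (List.replicate n.toNat (List.replicate n.toNat false)) i j = false := by
  unfold pvVGet
  have h1 : PySem.List.pyGetD (List.replicate n.toNat (List.replicate n.toNat false)) i [] = [] ∨
      PySem.List.pyGetD (List.replicate n.toNat (List.replicate n.toNat false)) i [] = List.replicate n.toNat false := by
    rcases Decidable.em (PySem.Raise.InRange (List.replicate n.toNat (List.replicate n.toNat false)).length i) with h | h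
    · exact Or.inr (List.eq_of_mem_replicate (PySem.List.pyGetD_mem _ [] h))
    · exact Or.inl (PySem.List.pyGetD_of_none _ _ _ ((PySem.List.pyGet?_eq_none_iff _ _).mpr h))
  rcases h1 with h | h <;> rw [h]
  · simp [PySem.List.pyGetD, PySem.List.pyGet?]
  · rcases Decidable.em (PySem.Raise.InRange (List.replicate n.toNat false).length j) with h2 | h2
    · exact List.eq_of_mem_replicate (PySem.List.pyGetD_mem _ false h2)
    · exact PySem.List.pyGetD_of_none _ _ _ ((PySem.List.pyGet?_eq_none_iff _ _).mpr h2)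

def pvOut (n a i j : Int) : Prop := i < a ∨ n - 1 - a < i ∨ j < a ∨ n - 1 - a < j
def pvHV (n : Int) (v : List (List Bool)) (P : Int → Int → Prop) : Prop :=
  ∀ i j : Int, 0 ≤ i → i < n → 0 ≤ j → j < n → (pvVGet v i j = true ↔ P i j)

theorem pvHV_vset (n : Int) (v : List (List Bool)) (P : Int → Int → Prop) (x y : Int)
    (hwf : pvWFv n v) (hv : pvHV n v P)
    (hx0 : 0 ≤ x) (hxn : x < n) (hy0 : 0 ≤ y) (hyn : y < n) :
    pvHV n (pvVSet v x y) (fun i j => P i j ∨ (i = x ∧ j = y)) := by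
  intro i j hi0 hin hj0 hjn
  rw [pvVGet_vset n v x y i j hwf hx0 hxn hy0 hyn hi0 hin hj0 hjn]
  split_ifs with h
  · exact ⟨fun _ => Or.inr h, fun _ => rfl⟩
  · rw [hv i j hi0 hin hj0 hjn]
    exact ⟨Or.inl, fun hq => hq.resolve_right h⟩

theorem pvHV_congr (n : Int) (v : List (List Bool)) (P Q : Int → Int → Prop)
    (hv : pvHV n v P) (h : ∀ i j : Int, 0 ≤ i → i < n → 0 ≤ j → j < n → (P i j ↔ Q i j)) :
    pvHV n v Q := fun i j hi0 hin hj0 hjn =>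
  (hv i j hi0 hin hj0 hjn).trans (h i j hi0 hin hj0 hjn)

-- walk right along the top row of ring a, ending turned downward at (a+1, R)
theorem pvSide1 : ∀ (k : Nat) (n a y : Int) (c : List (Int × Int)) (v : List (List Bool)),
    0 ≤ a → a + 1 ≤ n - 1 - a → a ≤ y → y + k = n - 1 - a →
    pvWFv n v →
    pvHV n v (fun i j => pvOut n a i j ∨ (i = a ∧ a ≤ j ∧ j < y)) →
    ∃ v', (pvStepA n)^[k + 1] (c, v, 0, a, y)
        = (c ++ (PySem.List.pyRange y (n - a) 1).map (fun j => (a, j)), v', 1, a + 1, n - 1 - a)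
      ∧ pvWFv n v'
      ∧ pvHV n v' (fun i j => pvOut n a i j ∨ (i = a ∧ a ≤ j ∧ j ≤ n - 1 - a)) := by
  intro k
  induction k with
  | zero =>
    intro n a y c v ha0 hs hay hk hwf hv
    have hy : y = n - 1 - a := by push_cast at hk; omega
    subst hy
    have hwf' := pvWFv_vset n v a (n - 1 - a) hwf ha0 (by omega) (by omega)
    have hv' := pvHV_vset n v _ a (n - 1 - a) hwf hv ha0 (by omega) (by omega) (by omega)
    have hcond : pvTurnCond n (pvVSet v a (n - 1 - a)) (a + 0) ((n - 1 - a) + 1) := by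
      by_cases hn : n ≤ n - 1 - a + 1
      · exact Or.inr (Or.inr (Or.inr (Or.inl hn)))
      · refine Or.inr (Or.inr (Or.inr (Or.inr ?_)))
        rw [hv' (a + 0) (n - 1 - a + 1) (by omega) (by omega) (by omega) (by omega)]
        unfold pvOut; omega
    refine ⟨pvVSet v a (n - 1 - a), ?_, hwf', ?_⟩
    · rw [Function.iterate_one, pvStepA_turn n c v 0 a (n - 1 - a) pvDirAt_0 pvMod1 pvDirAt_1 hcond]
      have hr : PySem.List.pyRange (n - 1 - a) (n - a) 1 = [n - 1 - a] := by
        have h2 : n - a = (n - 1 - a) + 1 := by omega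
        rw [h2]; exact PySem.List.pyRange_one_singleton _
      rw [hr]
      norm_num
    · refine pvHV_congr n _ _ _ hv' ?_
      intro i j hi0 hin hj0 hjn
      unfold pvOut
      constructor
      · intro h; omega
      · intro h; omega
  | succ k ih =>
    intro n a y c v ha0 hs hay hk hwf hv
    have hyR : y < n - 1 - a := by push_cast at hk; omega
    have hwf' := pvWFv_vset n v a y hwf ha0 (by omega) (by omega)
    have hv' := pvHV_vset n v _ a y hwf hv ha0 (by omega) (by omega) (by omega)
    have hcond : ¬ pvTurnCond n (pvVSet v a y) (a + 0) (y + 1) := by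
      intro hc
      rcases hc with h | h | h | h | h
      · omega
      · omega
      · omega
      · omega
      · rw [hv' (a + 0) (y + 1) (by omega) (by omega) (by omega) (by omega)] at h
        unfold pvOut at h; omega
    have hvnext : pvHV n (pvVSet v a y)
        (fun i j => pvOut n a i j ∨ (i = a ∧ a ≤ j ∧ j < y + 1)) := by
      refine pvHV_congr n _ _ _ hv' ?_
      intro i j hi0 hin hj0 hjn
      unfold pvOut
      constructor
      · intro h; omega
      · intro h; omega
    obtain ⟨v', hiter, hwf2, hv2⟩ := ih n a (y + 1) (c ++ [(a, y)]) (pvVSet v a y)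
      ha0 hs (by omega) (by push_cast at hk ⊢; omega) hwf' hvnext
    refine ⟨v', ?_, hwf2, hv2⟩
    rw [show k + 1 + 1 = (k + 1) + 1 from rfl, Function.iterate_succ_apply,
      pvStepA_move n c v 0 a y pvDirAt_0 hcond]
    have ha0' : a + 0 = a := by omega
    rw [ha0', hiter]
    have hr : PySem.List.pyRange y (n - a) 1 = y :: PySem.List.pyRange (y + 1) (n - a) 1 :=
      PySem.List.pyRange_one_cons (by omega)
    rw [hr]
    simp

-- walk down the right column of ring a, ending turned leftward at (R, R-1)
theorem pvSide2 : ∀ (k : Nat) (n a x : Int) (c : List (Int × Int)) (v : List (List Bool)),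
    0 ≤ a → a + 1 ≤ n - 1 - a → a + 1 ≤ x → x + k = n - 1 - a →
    pvWFv n v →
    pvHV n v (fun i j => pvOut n a i j ∨ (i = a ∧ a ≤ j ∧ j ≤ n - 1 - a)
      ∨ (j = n - 1 - a ∧ a + 1 ≤ i ∧ i < x)) →
    ∃ v', (pvStepA n)^[k + 1] (c, v, 1, x, n - 1 - a)
        = (c ++ (PySem.List.pyRange x (n - a) 1).map (fun i => (i, n - 1 - a)), v', 2,
            n - 1 - a, n - 1 - a - 1)
      ∧ pvWFv n v'
      ∧ pvHV n v' (fun i j => pvOut n a i j ∨ (i = a ∧ a ≤ j ∧ j ≤ n - 1 - a)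
          ∨ (j = n - 1 - a ∧ a + 1 ≤ i ∧ i ≤ n - 1 - a)) := by
  intro k
  induction k with
  | zero =>
    intro n a x c v ha0 hs hax hk hwf hv
    have hx : x = n - 1 - a := by push_cast at hk; omega
    subst hx
    have hwf' := pvWFv_vset n v (n - 1 - a) (n - 1 - a) hwf (by omega) (by omega) (by omega)
    have hv' := pvHV_vset n v _ (n - 1 - a) (n - 1 - a) hwf hv (by omega) (by omega) (by omega) (by omega)
    have hcond : pvTurnCond n (pvVSet v (n - 1 - a) (n - 1 - a)) ((n - 1 - a) + 1) ((n - 1 - a) + 0) := by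
      by_cases hn : n ≤ n - 1 - a + 1
      · exact Or.inr (Or.inl hn)
      · refine Or.inr (Or.inr (Or.inr (Or.inr ?_)))
        rw [hv' ((n - 1 - a) + 1) ((n - 1 - a) + 0) (by omega) (by omega) (by omega) (by omega)]
        unfold pvOut; omega
    refine ⟨pvVSet v (n - 1 - a) (n - 1 - a), ?_, hwf', ?_⟩
    · rw [Function.iterate_one,
        pvStepA_turn n c v 1 (n - 1 - a) (n - 1 - a) pvDirAt_1 pvMod2 pvDirAt_2 hcond]
      have hr : PySem.List.pyRange (n - 1 - a) (n - a) 1 = [n - 1 - a] := by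
        have h2 : n - a = (n - 1 - a) + 1 := by omega
        rw [h2]; exact PySem.List.pyRange_one_singleton _
      rw [hr]
      norm_num
      omega
    · refine pvHV_congr n _ _ _ hv' ?_
      intro i j hi0 hin hj0 hjn
      unfold pvOut
      constructor
      · intro h; omega
      · intro h; omega
  | succ k ih =>
    intro n a x c v ha0 hs hax hk hwf hv
    have hxR : x < n - 1 - a := by push_cast at hk; omega
    have hwf' := pvWFv_vset n v x (n - 1 - a) hwf (by omega) (by omega) (by omega)
    have hv' := pvHV_vset n v _ x (n - 1 - a) hwf hv (by omega) (by omega) (by omega) (by omega)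
    have hcond : ¬ pvTurnCond n (pvVSet v x (n - 1 - a)) (x + 1) ((n - 1 - a) + 0) := by
      intro hc
      rcases hc with h | h | h | h | h
      · omega
      · omega
      · omega
      · omega
      · rw [hv' (x + 1) ((n - 1 - a) + 0) (by omega) (by omega) (by omega) (by omega)] at h
        unfold pvOut at h; omega
    have hvnext : pvHV n (pvVSet v x (n - 1 - a))
        (fun i j => pvOut n a i j ∨ (i = a ∧ a ≤ j ∧ j ≤ n - 1 - a)
          ∨ (j = n - 1 - a ∧ a + 1 ≤ i ∧ i < x + 1)) := by
      refine pvHV_congr n _ _ _ hv' ?_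
      intro i j hi0 hin hj0 hjn
      unfold pvOut
      constructor
      · intro h; omega
      · intro h; omega
    obtain ⟨v', hiter, hwf2, hv2⟩ := ih n a (x + 1) (c ++ [(x, n - 1 - a)]) (pvVSet v x (n - 1 - a))
      ha0 hs (by omega) (by push_cast at hk ⊢; omega) hwf' hvnext
    refine ⟨v', ?_, hwf2, hv2⟩
    rw [show k + 1 + 1 = (k + 1) + 1 from rfl, Function.iterate_succ_apply,
      pvStepA_move n c v 1 x (n - 1 - a) pvDirAt_1 hcond]
    have ha0' : (n - 1 - a) + 0 = n - 1 - a := by omega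
    rw [ha0', hiter]
    have hr : PySem.List.pyRange x (n - a) 1 = x :: PySem.List.pyRange (x + 1) (n - a) 1 :=
      PySem.List.pyRange_one_cons (by omega)
    rw [hr]
    simp

-- walk left along the bottom row of ring a, ending turned upward at (R-1, a)
theorem pvSide3 : ∀ (k : Nat) (n a y : Int) (c : List (Int × Int)) (v : List (List Bool)),
    0 ≤ a → a + 1 ≤ n - 1 - a → a + k = y → y ≤ n - 1 - a - 1 →
    pvWFv n v →
    pvHV n v (fun i j => pvOut n a i j ∨ (i = a ∧ a ≤ j ∧ j ≤ n - 1 - a)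
      ∨ (j = n - 1 - a ∧ a + 1 ≤ i ∧ i ≤ n - 1 - a)
      ∨ (i = n - 1 - a ∧ y < j ∧ j ≤ n - 1 - a - 1)) →
    ∃ v', (pvStepA n)^[k + 1] (c, v, 2, n - 1 - a, y)
        = (c ++ (PySem.List.pyRange y (a - 1) (-1)).map (fun j => (n - 1 - a, j)), v', 3,
            n - 1 - a - 1, a)
      ∧ pvWFv n v'
      ∧ pvHV n v' (fun i j => pvOut n a i j ∨ (i = a ∧ a ≤ j ∧ j ≤ n - 1 - a)
          ∨ (j = n - 1 - a ∧ a + 1 ≤ i ∧ i ≤ n - 1 - a)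
          ∨ (i = n - 1 - a ∧ a ≤ j ∧ j ≤ n - 1 - a - 1)) := by
  intro k
  induction k with
  | zero =>
    intro n a y c v ha0 hs hk hyR hwf hv
    have hy : a = y := by push_cast at hk; omega
    subst hy
    have hwf' := pvWFv_vset n v (n - 1 - a) a hwf (by omega) (by omega) (by omega)
    have hv' := pvHV_vset n v _ (n - 1 - a) a hwf hv (by omega) (by omega) (by omega) (by omega)
    have hcond : pvTurnCond n (pvVSet v (n - 1 - a) a) ((n - 1 - a) + 0) (a + -1) := by
      by_cases hn : a + -1 < 0
      · exact Or.inr (Or.inr (Or.inl hn))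
      · refine Or.inr (Or.inr (Or.inr (Or.inr ?_)))
        rw [hv' ((n - 1 - a) + 0) (a + -1) (by omega) (by omega) (by omega) (by omega)]
        unfold pvOut; omega
    refine ⟨pvVSet v (n - 1 - a) a, ?_, hwf', ?_⟩
    · rw [Function.iterate_one,
        pvStepA_turn n c v 2 (n - 1 - a) a pvDirAt_2 pvMod3 pvDirAt_3 hcond]
      have hr : PySem.List.pyRange a (a - 1) (-1) = [a] := by
        rw [PySem.List.pyRange_neg_one_cons (by omega)]
        rw [PySem.List.pyRange_neg_one_eq_nil (by omega)]
      rw [hr]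
      norm_num
      omega
    · refine pvHV_congr n _ _ _ hv' ?_
      intro i j hi0 hin hj0 hjn
      unfold pvOut
      constructor
      · intro h; omega
      · intro h; omega
  | succ k ih =>
    intro n a y c v ha0 hs hk hyR hwf hv
    have hya : a < y := by push_cast at hk; omega
    have hwf' := pvWFv_vset n v (n - 1 - a) y hwf (by omega) (by omega) (by omega)
    have hv' := pvHV_vset n v _ (n - 1 - a) y hwf hv (by omega) (by omega) (by omega) (by omega)
    have hcond : ¬ pvTurnCond n (pvVSet v (n - 1 - a) y) ((n - 1 - a) + 0) (y + -1) := by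
      intro hc
      rcases hc with h | h | h | h | h
      · omega
      · omega
      · omega
      · omega
      · rw [hv' ((n - 1 - a) + 0) (y + -1) (by omega) (by omega) (by omega) (by omega)] at h
        unfold pvOut at h; omega
    have hvnext : pvHV n (pvVSet v (n - 1 - a) y)
        (fun i j => pvOut n a i j ∨ (i = a ∧ a ≤ j ∧ j ≤ n - 1 - a)
          ∨ (j = n - 1 - a ∧ a + 1 ≤ i ∧ i ≤ n - 1 - a)
          ∨ (i = n - 1 - a ∧ y - 1 < j ∧ j ≤ n - 1 - a - 1)) := by
      refine pvHV_congr n _ _ _ hv' ?_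
      intro i j hi0 hin hj0 hjn
      unfold pvOut
      constructor
      · intro h; omega
      · intro h; omega
    obtain ⟨v', hiter, hwf2, hv2⟩ := ih n a (y - 1) (c ++ [(n - 1 - a, y)]) (pvVSet v (n - 1 - a) y)
      ha0 hs (by push_cast at hk ⊢; omega) (by omega) hwf' (by
        refine pvHV_congr n _ _ _ hvnext ?_
        intro i j hi0 hin hj0 hjn
        exact Iff.rfl)
    refine ⟨v', ?_, hwf2, hv2⟩
    rw [show k + 1 + 1 = (k + 1) + 1 from rfl, Function.iterate_succ_apply,
      pvStepA_move n c v 2 (n - 1 - a) y pvDirAt_2 hcond]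
    have ha0' : (n - 1 - a) + 0 = n - 1 - a := by omega
    have hy1 : y + -1 = y - 1 := by omega
    rw [ha0', hy1, hiter]
    have hr : PySem.List.pyRange y (a - 1) (-1) = y :: PySem.List.pyRange (y - 1) (a - 1) (-1) :=
      PySem.List.pyRange_neg_one_cons (by omega)
    rw [hr]
    simp

-- walk up the left column of ring a (only when the ring has ≥ 3 rows),
-- ending turned rightward at (a+1, a+1) with all of rings 0..a visited
theorem pvSide4 : ∀ (k : Nat) (n a x : Int) (c : List (Int × Int)) (v : List (List Bool)),
    0 ≤ a → a + 2 ≤ n - 1 - a → (a + 1) + k = x → x ≤ n - 1 - a - 1 →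
    pvWFv n v →
    pvHV n v (fun i j => pvOut n a i j ∨ (i = a ∧ a ≤ j ∧ j ≤ n - 1 - a)
      ∨ (j = n - 1 - a ∧ a + 1 ≤ i ∧ i ≤ n - 1 - a)
      ∨ (i = n - 1 - a ∧ a ≤ j ∧ j ≤ n - 1 - a - 1)
      ∨ (j = a ∧ x < i ∧ i ≤ n - 1 - a - 1)) →
    ∃ v', (pvStepA n)^[k + 1] (c, v, 3, x, a)
        = (c ++ (PySem.List.pyRange x a (-1)).map (fun i => (i, a)), v', 0, a + 1, a + 1)
      ∧ pvWFv n v'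
      ∧ pvHV n v' (fun i j => pvOut n (a + 1) i j) := by
  intro k
  induction k with
  | zero =>
    intro n a x c v ha0 hs hk hxR hwf hv
    have hx : x = a + 1 := by push_cast at hk; omega
    subst hx
    have hwf' := pvWFv_vset n v (a + 1) a hwf (by omega) (by omega) (by omega)
    have hv' := pvHV_vset n v _ (a + 1) a hwf hv (by omega) (by omega) (by omega) (by omega)
    have hcond : pvTurnCond n (pvVSet v (a + 1) a) ((a + 1) + -1) (a + 0) := by
      refine Or.inr (Or.inr (Or.inr (Or.inr ?_)))
      rw [hv' ((a + 1) + -1) (a + 0) (by omega) (by omega) (by omega) (by omega)]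
      unfold pvOut; omega
    refine ⟨pvVSet v (a + 1) a, ?_, hwf', ?_⟩
    · rw [Function.iterate_one,
        pvStepA_turn n c v 3 (a + 1) a pvDirAt_3 pvMod0 pvDirAt_0 hcond]
      have hr : PySem.List.pyRange (a + 1) a (-1) = [a + 1] := by
        rw [PySem.List.pyRange_neg_one_cons (by omega)]
        rw [PySem.List.pyRange_neg_one_eq_nil (by omega)]
      rw [hr]
      norm_num
    · refine pvHV_congr n _ _ _ hv' ?_
      intro i j hi0 hin hj0 hjn
      unfold pvOut
      constructor
      · intro h; omega
      · intro h; omega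
  | succ k ih =>
    intro n a x c v ha0 hs hk hxR hwf hv
    have hxa : a + 1 < x := by push_cast at hk; omega
    have hwf' := pvWFv_vset n v x a hwf (by omega) (by omega) (by omega)
    have hv' := pvHV_vset n v _ x a hwf hv (by omega) (by omega) (by omega) (by omega)
    have hcond : ¬ pvTurnCond n (pvVSet v x a) (x + -1) (a + 0) := by
      intro hc
      rcases hc with h | h | h | h | h
      · omega
      · omega
      · omega
      · omega
      · rw [hv' (x + -1) (a + 0) (by omega) (by omega) (by omega) (by omega)] at h
        unfold pvOut at h; omega
    have hvnext : pvHV n (pvVSet v x a)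
        (fun i j => pvOut n a i j ∨ (i = a ∧ a ≤ j ∧ j ≤ n - 1 - a)
          ∨ (j = n - 1 - a ∧ a + 1 ≤ i ∧ i ≤ n - 1 - a)
          ∨ (i = n - 1 - a ∧ a ≤ j ∧ j ≤ n - 1 - a - 1)
          ∨ (j = a ∧ x - 1 < i ∧ i ≤ n - 1 - a - 1)) := by
      refine pvHV_congr n _ _ _ hv' ?_
      intro i j hi0 hin hj0 hjn
      unfold pvOut
      constructor
      · intro h; omega
      · intro h; omega
    obtain ⟨v', hiter, hwf2, hv2⟩ := ih n a (x - 1) (c ++ [(x, a)]) (pvVSet v x a)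
      ha0 hs (by push_cast at hk ⊢; omega) (by omega) hwf' hvnext
    refine ⟨v', ?_, hwf2, hv2⟩
    rw [show k + 1 + 1 = (k + 1) + 1 from rfl, Function.iterate_succ_apply,
      pvStepA_move n c v 3 x a pvDirAt_3 hcond]
    have hx1 : x + -1 = x - 1 := by omega
    have ha0' : a + 0 = a := by omega
    rw [hx1, ha0', hiter]
    have hr : PySem.List.pyRange x a (-1) = x :: PySem.List.pyRange (x - 1) a (-1) :=
      PySem.List.pyRange_neg_one_cons (by omega)
    rw [hr]
    simp

theorem pvBLoop_stop (c : List (Int × Int)) (t b l r : Int) (h : ¬ (t ≤ b ∧ l ≤ r)) :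
    pvBLoop c t b l r = c := by
  rw [pvBLoop]; simp [h]

theorem pvBLoop_ring (c : List (Int × Int)) (a R : Int) (h : a ≤ R) :
    pvBLoop c a R a R =
      pvBLoop (c ++ (PySem.List.pyRange a (R + 1) 1).map (fun y => (a, y))
          ++ (PySem.List.pyRange (a + 1) (R + 1) 1).map (fun x => (x, R))
          ++ (if a < R then (PySem.List.pyRange (R - 1) (a - 1) (-1)).map (fun y => (R, y)) else [])
          ++ (if a < R then (PySem.List.pyRange (R - 1) a (-1)).map (fun x => (x, a)) else []))
        (a + 1) (R - 1) (a + 1) (R - 1) := by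
  rw [pvBLoop]
  rw [if_pos (⟨h, h⟩ : a ≤ R ∧ a ≤ R)]
  simp only [PySem.List.foldl_append_singleton_eq_map]
  congr 1
  split_ifs with hlt
  · simp [List.append_assoc]
  · simp [List.append_assoc]

theorem pvMain : ∀ (s : Nat) (n a : Int) (c : List (Int × Int)) (v : List (List Bool)),
    0 ≤ a → (s : Int) = n - 2 * a → 1 ≤ s →
    pvWFv n v → pvHV n v (fun i j => pvOut n a i j) →
    ((pvStepA n)^[s * s] (c, v, 0, a, a)).1 = pvBLoop c a (n - 1 - a) a (n - 1 - a) := by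
  intro s
  induction s using Nat.strong_induction_on with
  | _ s ih =>
    match s, ih with
    | 0, _ => intro n a c v _ _ h1 _ _; omega
    | 1, _ =>
      intro n a c v ha0 hs _ hwf hv
      have hR : n - 1 - a = a := by push_cast at hs; omega
      rw [hR, pvBLoop_ring c a a le_rfl, pvBLoop_stop _ _ _ _ _ (by omega)]
      have h1 : PySem.List.pyRange a (a + 1) 1 = [a] := PySem.List.pyRange_one_singleton _
      have h2 : PySem.List.pyRange (a + 1) (a + 1) 1 = [] := PySem.List.pyRange_one_eq_nil le_rfl
      rw [h1, h2]
      simp only [lt_irrefl a, if_false, List.map_nil, List.map_cons, List.append_nil]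
      show (pvStepA n (c, v, 0, a, a)).1 = _
      rw [pvStepA_fst]
    | 2, _ =>
      intro n a c v ha0 hs _ hwf hv
      have hR : n - 1 - a = a + 1 := by push_cast at hs; omega
      obtain ⟨v1, hit1, hwf1, hv1⟩ := pvSide1 1 n a a c v ha0 (by omega) le_rfl (by push_cast; omega)
        hwf (pvHV_congr n _ _ _ hv (by intro i j _ _ _ _; unfold pvOut; omega))
      obtain ⟨v2, hit2, hwf2, hv2⟩ := pvSide2 0 n a (a + 1) _ v1 ha0 (by omega) le_rfl
        (by push_cast; omega) hwf1
        (pvHV_congr n _ _ _ hv1 (by intro i j _ _ _ _; unfold pvOut; omega))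
      obtain ⟨v3, hit3, hwf3, hv3⟩ := pvSide3 0 n a (n - 1 - a - 1) _ v2 ha0 (by omega)
        (by omega) (by omega) hwf2
        (pvHV_congr n _ _ _ hv2 (by intro i j _ _ _ _; unfold pvOut; omega))
      simp only [show (0 : Nat) + 1 = 1 from rfl] at hit2 hit3
      have e1 : (pvStepA n)^[2 * 2] (c, v, 0, a, a) =
          (pvStepA n)^[1] ((pvStepA n)^[1] ((pvStepA n)^[1 + 1] (c, v, 0, a, a))) := by
        rw [← Function.iterate_add_apply, ← Function.iterate_add_apply]
      rw [e1, hit1, hit2, hit3]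
      rw [pvBLoop_ring c a (n - 1 - a) (by omega), pvBLoop_stop _ _ _ _ _ (by omega)]
      rw [if_pos (by omega : a < n - 1 - a), if_pos (by omega : a < n - 1 - a)]
      rw [show n - a = n - 1 - a + 1 from by omega]
      rw [PySem.List.pyRange_neg_one_eq_nil (by omega : n - 1 - a - 1 ≤ a)]
      simp [List.append_assoc]
    | (k + 3), ih =>
      intro n a c v ha0 hs _ hwf hv
      have hR : n - 1 - a = a + (k + 2) := by push_cast at hs; omega
      obtain ⟨v1, hit1, hwf1, hv1⟩ := pvSide1 (k + 2) n a a c v ha0 (by omega) le_rfl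
        (by push_cast; omega) hwf
        (pvHV_congr n _ _ _ hv (by intro i j _ _ _ _; unfold pvOut; omega))
      obtain ⟨v2, hit2, hwf2, hv2⟩ := pvSide2 (k + 1) n a (a + 1)
        (c ++ (PySem.List.pyRange a (n - a) 1).map (fun j => (a, j))) v1 ha0 (by omega) le_rfl
        (by push_cast; omega) hwf1
        (pvHV_congr n _ _ _ hv1 (by intro i j _ _ _ _; unfold pvOut; omega))
      obtain ⟨v3, hit3, hwf3, hv3⟩ := pvSide3 (k + 1) n a (n - 1 - a - 1)
        (c ++ (PySem.List.pyRange a (n - a) 1).map (fun j => (a, j))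
           ++ (PySem.List.pyRange (a + 1) (n - a) 1).map (fun i => (i, n - 1 - a))) v2 ha0 (by omega)
        (by push_cast; omega) (by omega) hwf2
        (pvHV_congr n _ _ _ hv2 (by intro i j _ _ _ _; unfold pvOut; omega))
      obtain ⟨v4, hit4, hwf4, hv4⟩ := pvSide4 k n a (n - 1 - a - 1)
        (c ++ (PySem.List.pyRange a (n - a) 1).map (fun j => (a, j))
           ++ (PySem.List.pyRange (a + 1) (n - a) 1).map (fun i => (i, n - 1 - a))
           ++ (PySem.List.pyRange (n - 1 - a - 1) (a - 1) (-1)).map (fun j => (n - 1 - a, j))) v3 ha0 (by omega)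
        (by omega) (by omega) hwf3
        (pvHV_congr n _ _ _ hv3 (by intro i j _ _ _ _; unfold pvOut; omega))
      have hIH := ih (k + 1) (by omega) n (a + 1)
        (c ++ (PySem.List.pyRange a (n - a) 1).map (fun j => (a, j))
           ++ (PySem.List.pyRange (a + 1) (n - a) 1).map (fun i => (i, n - 1 - a))
           ++ (PySem.List.pyRange (n - 1 - a - 1) (a - 1) (-1)).map (fun j => (n - 1 - a, j))
           ++ (PySem.List.pyRange (n - 1 - a - 1) a (-1)).map (fun i => (i, a))) v4 (by omega)
        (by push_cast at hs ⊢; omega) (by omega) hwf4 hv4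
      have e1 : (pvStepA n)^[(k + 3) * (k + 3)] (c, v, 0, a, a) =
          (pvStepA n)^[(k + 1) * (k + 1)] ((pvStepA n)^[k + 1] ((pvStepA n)^[k + 1 + 1]
            ((pvStepA n)^[k + 1 + 1] ((pvStepA n)^[k + 2 + 1] (c, v, 0, a, a))))) := by
        rw [← Function.iterate_add_apply, ← Function.iterate_add_apply,
          ← Function.iterate_add_apply, ← Function.iterate_add_apply]
        congr 1
        ring
      rw [e1, hit1, hit2, hit3, hit4, hIH]
      rw [pvBLoop_ring c a (n - 1 - a) (by omega)]
      rw [if_pos (by omega : a < n - 1 - a), if_pos (by omega : a < n - 1 - a)]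
      rw [show n - a = n - 1 - a + 1 from by omega,
        show n - 1 - (a + 1) = n - 1 - a - 1 from by omega]

theorem pvFinal (n : Int) (hn : 0 ≤ n) :
    generate_hamiltonian_cycle n = generate_hamiltonian_cycle_alt n := by
  unfold generate_hamiltonian_cycle generate_hamiltonian_cycle_alt
  by_cases h0 : n = 0
  · subst h0
    rw [pvBLoop_stop _ _ _ _ _ (by omega)]
    rfl
  · have hcast : n = (n.toNat : Int) := (Int.toNat_of_nonneg hn).symm
    have hm : (n * n).toNat = n.toNat * n.toNat := by
      conv_lhs => rw [hcast, ← Nat.cast_mul, Int.toNat_natCast]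
    have hwf : pvWFv n (List.replicate n.toNat (List.replicate n.toNat false)) :=
      ⟨by simp, fun row hr => by rw [List.eq_of_mem_replicate hr]; simp⟩
    have hv : pvHV n (List.replicate n.toNat (List.replicate n.toNat false))
        (fun i j => pvOut n 0 i j) := by
      intro i j hi0 hin hj0 hjn
      rw [pvVGet_replicate]
      simp only [Bool.false_eq_true, false_iff]
      unfold pvOut
      omega
    have := pvMain n.toNat n 0 [] _ le_rfl (by omega) (by omega) hwf hv
    rw [hm, this, show n - 1 - 0 = n - 1 from by ring]

-- ===== VERDICT (by name: the statement is the Claim_ definition above) =====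
theorem generate_hamiltonian_cycle_spec : Claim_equal_generate_hamiltonian_cycle := by
  intro n _ hn
  unfold Spec_generate_hamiltonian_cycle
  exact pvFinal n hn
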